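-- pv_equiv track=rewrite | github.com/Nassuka/repo | fonctions.py | space_in_numbers
-- ===== SOURCE A (Python) =====
-- def space_in_numbers(x):
--     n= ""
--
--     for i in range(1,len(x) + 1):
--         if i%3 == 0 and i != len(x):
--             n = " " + x[-i] + n
--         else :
--             n = x[-i] + n
--
--     return n
-- ===== SOURCE B (Python) =====
-- def space_in_numbers(x):
--     chunks = [x[max(0, i - 3):i] for i in range(len(x), 0, -3)]
--     chunks.reverse()
--     return " ".join(chunks)
-- ===== Notes on version B (the rewrite author's own statement) =====
-- stated objective: faster
-- what changed: B slices the string into three-character chunks from the right and joins them with spaces, instead of A's per-character loop that rebuilds the whole string by prepending (with an i%3 modulo test) at every step.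
import Mathlib
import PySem

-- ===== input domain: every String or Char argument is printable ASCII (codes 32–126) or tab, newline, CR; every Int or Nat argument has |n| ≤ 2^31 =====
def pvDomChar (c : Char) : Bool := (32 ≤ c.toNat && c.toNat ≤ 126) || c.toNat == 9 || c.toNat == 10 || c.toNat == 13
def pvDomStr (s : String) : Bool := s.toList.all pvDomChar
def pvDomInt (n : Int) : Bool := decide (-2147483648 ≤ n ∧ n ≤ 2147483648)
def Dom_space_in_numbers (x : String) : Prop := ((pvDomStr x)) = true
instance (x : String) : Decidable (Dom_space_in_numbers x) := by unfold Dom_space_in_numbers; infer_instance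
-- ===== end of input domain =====

-- B slices the string into three-character chunks from the right and joins them with
-- spaces, instead of A's per-character loop that prepends at each step (objective: faster;
-- a timing run measured B faster on the generated inputs).

-- ===== PORT A =====
-- loop body of A: n = (" " +) x[-i] + n   (x[-i] is always in range since 1 ≤ i ≤ len(x),
-- so pyGetD is exact here)
def bodyA (s : List Char) (n : List Char) (i : Int) : List Char :=
  if PySem.Int.mod i 3 == 0 && !(i == (s.length : Int)) then
    ' ' :: PySem.List.pyGetD s (-i) ' ' :: n
  else
    PySem.List.pyGetD s (-i) ' ' :: n

-- n = ""; for i in range(1, len(x)+1): …; return n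
def spaceA (s : List Char) : List Char :=
  (PySem.List.pyRange 1 ((s.length : Int) + 1) 1).foldl (bodyA s) []

def space_in_numbers (x : String) : String := String.ofList (spaceA x.toList)

-- ===== PORT B =====
-- chunks = [x[max(0,i-3):i] for i in range(len(x),0,-3)]; chunks.reverse(); " ".join(chunks)
def spaceB (s : List Char) : List Char :=
  PySem.Chars.join [' ']
    (((PySem.List.pyRange (s.length : Int) 0 (-3)).map
        (fun i => PySem.List.slice s (some (max 0 (i - 3))) (some i))).reverse)

def space_in_numbers_alt (x : String) : String := String.ofList (spaceB x.toList)

-- ===== PRECONDITION & SPEC =====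
def Spec_space_in_numbers (x : String) (out : String) : Prop := out = space_in_numbers_alt x
instance (x : String) (out : String) : Decidable (Spec_space_in_numbers x out) := by unfold Spec_space_in_numbers; infer_instance

-- ===== CLAIM (what is proved, stated in full; the proofs are below) =====
def Claim_equal_space_in_numbers : Prop := ∀ (x : String), Dom_space_in_numbers x → Spec_space_in_numbers x (space_in_numbers x)

-- ===== LEMMAS AND PROOFS =====

-- A's loop body only prepends, so the accumulator factors out
theorem bodyA_append (s : List Char) (a : List Char) (i : Int) :
    bodyA s a i = bodyA s [] i ++ a := by
  unfold bodyA; split <;> simp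

theorem foldl_bodyA (s : List Char) (l : List Int) (a : List Char) :
    l.foldl (bodyA s) a = l.foldl (bodyA s) [] ++ a := by
  induction l generalizing a with
  | nil => simp
  | cons i t ih =>
      rw [List.foldl_cons, List.foldl_cons, ih (bodyA s a i), ih (bodyA s [] i),
        bodyA_append s a i, List.append_assoc]

-- range(n, 0, -3) peels one index at a time
theorem pyRange_neg3_cons (n : Int) (h : 0 < n) :
    PySem.List.pyRange n 0 (-3) = n :: PySem.List.pyRange (n - 3) 0 (-3) := by
  unfold PySem.List.pyRange
  norm_num
  rw [if_pos h]
  rcases lt_or_ge 3 n with h3 | h3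
  · rw [if_pos h3]
    have hc2 : ((n + 3 - 1) / 3).toNat = ((n - 1) / 3).toNat + 1 := by omega
    rw [hc2, List.range_succ_eq_map]
    simp only [List.map_cons, List.map_map]
    refine List.cons_eq_cons.mpr ⟨by push_cast; ring, ?_⟩
    apply List.map_congr_left; intro k _; simp [Function.comp]; ring
  · rw [if_neg (by omega)]
    have : ((n + 3 - 1) / 3).toNat = 1 := by omega
    rw [this]
    simp

theorem mem_pyRange_neg3 {n i : Int} (h : i ∈ PySem.List.pyRange n 0 (-3)) :
    0 < i ∧ i ≤ n := by
  unfold PySem.List.pyRange at h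
  norm_num at h
  split_ifs at h with h1
  · obtain ⟨k, hk, rfl⟩ := h
    have hk' : (k : Int) < (n + 3 - 1) / 3 := by omega
    omega
  · simp at h

-- " ".join over a snoc
theorem join_append_singleton (sep : List Char) (l : List (List Char)) (u : List Char)
    (h : l ≠ []) : PySem.Chars.join sep (l ++ [u]) = PySem.Chars.join sep l ++ sep ++ u := by
  induction l with
  | nil => simp at h
  | cons p t ih =>
      cases t with
      | nil => simp [PySem.Chars.join, List.intercalate]
      | cons q r =>
          have ih' := ih (by simp)
          rw [List.cons_append] at ih'
          simp only [List.cons_append]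
          rw [PySem.Chars.join_cons_cons, ih', PySem.Chars.join_cons_cons]
          simp [List.append_assoc]

-- base cases: at most three characters come back unchanged
theorem spaceA_short (s : List Char) (h : s.length ≤ 3) : spaceA s = s := by
  match s, h with
  | [], _ => rfl
  | [a], _ =>
      simp [spaceA, bodyA, PySem.List.pyGetD, PySem.List.pyGet?, PySem.List.pyIdx?,
        PySem.List.pyRange, PySem.Int.mod, List.foldl, List.range_succ]
  | [a, b], _ =>
      simp [spaceA, bodyA, PySem.List.pyGetD, PySem.List.pyGet?, PySem.List.pyIdx?,
        PySem.List.pyRange, PySem.Int.mod, List.foldl, List.range_succ]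
  | [a, b, c], _ =>
      simp [spaceA, bodyA, PySem.List.pyGetD, PySem.List.pyGet?, PySem.List.pyIdx?,
        PySem.List.pyRange, PySem.Int.mod, List.foldl, List.range_succ]

theorem spaceB_short (s : List Char) (h : s.length ≤ 3) : spaceB s = s := by
  match s, h with
  | [], _ => rfl
  | [a], _ =>
      simp [spaceB, PySem.List.pyRange, PySem.List.slice, PySem.List.clampIdx,
        PySem.Chars.join, List.intercalate]
  | [a, b], _ =>
      simp [spaceB, PySem.List.pyRange, PySem.List.slice, PySem.List.clampIdx,
        PySem.Chars.join, List.intercalate]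
  | [a, b, c], _ =>
      simp [spaceB, PySem.List.pyRange, PySem.List.slice, PySem.List.clampIdx,
        PySem.Chars.join, List.intercalate]

-- A's last-three characters, x[-k] for k = 1, 2, 3
theorem getLast3 (t : List Char) (a b c : Char) (k : Nat) (hk : 1 ≤ k) (hk3 : k ≤ 3) :
    PySem.List.pyGetD (t ++ [a, b, c]) (-(k : Int)) ' ' = [a, b, c][3 - k]'(by simp; omega) := by
  unfold PySem.List.pyGetD
  rw [PySem.List.pyGet?_neg_natCast _ _ (by omega) (by simp; omega)]
  have hidx : (t ++ [a, b, c]).length - k = t.length + (3 - k) := by simp; omega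
  rw [hidx, List.getElem?_append_right (by omega)]
  have h2 : t.length + (3 - k) - t.length = 3 - k := by omega
  rw [h2]
  rw [List.getElem?_eq_getElem (by simp; omega)]
  rfl

-- step case for A: peel the last three characters
theorem spaceA_step (t : List Char) (a b c : Char) (ht : t ≠ []) :
    spaceA (t ++ [a, b, c]) = spaceA t ++ ' ' :: a :: b :: c :: [] := by
  have hm1 : 1 ≤ t.length := List.length_pos_iff.mpr ht
  have hlen : (t ++ [a, b, c]).length = t.length + 3 := by simp
  unfold spaceA
  rw [hlen, PySem.List.pyRange_one, PySem.List.pyRange_one]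
  have h1 : ((↑(t.length + 3) + 1 - 1 : Int)).toNat = 3 + t.length := by omega
  have h2 : ((↑t.length + 1 - 1 : Int)).toNat = t.length := by omega
  rw [h1, h2, List.range_add, List.map_append, List.foldl_append]
  have hfirst : List.map (fun k : Nat => (1 : Int) + (k : Int)) (List.range 3) = [1, 2, 3] := by
    decide
  rw [hfirst]
  have g1 := getLast3 t a b c 1 (by omega) (by omega)
  have g2 := getLast3 t a b c 2 (by omega) (by omega)
  have g3 := getLast3 t a b c 3 (by omega) (by omega)
  norm_num at g1 g2 g3
  have hmod1 : (PySem.Int.mod 1 3 == (0 : Int)) = false := by decide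
  have hmod2 : (PySem.Int.mod 2 3 == (0 : Int)) = false := by decide
  have hmod3 : (PySem.Int.mod 3 3 == (0 : Int)) = true := by decide
  have hne : ((3 : Int) == ((t ++ [a, b, c]).length : Int)) = false := by
    simp only [beq_eq_false_iff_ne, ne_eq, hlen]
    push_cast
    omega
  have hacc : List.foldl (bodyA (t ++ [a, b, c])) [] [1, 2, 3] = [' ', a, b, c] := by
    simp [bodyA, g1, g2, g3, hmod1, hmod2, hmod3, hne, ht]
  rw [hacc, foldl_bodyA, List.map_map]
  congr 1
  rw [List.foldl_map, List.foldl_map]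
  apply PySem.List.foldl_congr_mem
  intro acc k hk
  rw [List.mem_range] at hk
  show bodyA (t ++ [a, b, c]) acc (1 + ↑(3 + k)) = bodyA t acc (1 + ↑k)
  have e1 : PySem.Int.mod (1 + ((3 + k : Nat) : Int)) 3 = PySem.Int.mod (1 + (k : Int)) 3 := by
    unfold PySem.Int.mod
    rw [show (1 + ((3 + k : Nat) : Int)) = (1 + (k : Int)) + 3 * 1 by push_cast; ring]
    exact Int.add_mul_fmod_self_left (1 + (k : Int)) 3 1
  have e2 : ((1 + ((3 + k : Nat) : Int)) == (((t ++ [a, b, c]).length : Nat) : Int))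
      = ((1 + (k : Int)) == ((t.length : Nat) : Int)) := by
    rw [Bool.eq_iff_iff]
    simp only [beq_iff_eq, hlen]
    push_cast
    omega
  have e3 : PySem.List.pyGetD (t ++ [a, b, c]) (-(1 + ((3 + k : Nat) : Int))) ' '
      = PySem.List.pyGetD t (-(1 + (k : Int))) ' ' := by
    unfold PySem.List.pyGetD
    rw [show (-(1 + ((3 + k : Nat) : Int))) = -(((k + 4 : Nat)) : Int) by push_cast; ring,
        show (-(1 + (k : Int))) = -(((k + 1 : Nat)) : Int) by push_cast; ring]
    rw [PySem.List.pyGet?_neg_natCast _ _ (by omega)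
          (by simp only [List.length_append, List.length_cons, List.length_nil]; omega),
        PySem.List.pyGet?_neg_natCast _ _ (by omega) (by omega)]
    have hidx : (t ++ [a, b, c]).length - (k + 4) = t.length - (k + 1) := by
      simp only [List.length_append, List.length_cons, List.length_nil]; omega
    rw [hidx, List.getElem?_append_left (by omega)]
  unfold bodyA
  rw [e1, e2, e3]

-- step case for B: the first chunk of range(len,0,-3) is the last three characters
theorem spaceB_step (t : List Char) (a b c : Char) (ht : t ≠ []) :
    spaceB (t ++ [a, b, c]) = spaceB t ++ ' ' :: a :: b :: c :: [] := by
  have hm1 : 1 ≤ t.length := List.length_pos_iff.mpr ht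
  have hlen : (t ++ [a, b, c]).length = t.length + 3 := by
    simp only [List.length_append, List.length_cons, List.length_nil]
  unfold spaceB
  rw [hlen]
  rw [pyRange_neg3_cons _ (by push_cast; omega)]
  have hsub : ((t.length + 3 : Nat) : Int) - 3 = (t.length : Int) := by push_cast; ring
  rw [hsub]
  rw [List.map_cons, List.reverse_cons]
  have hchunk : PySem.List.slice (t ++ [a, b, c]) (some (max 0 (((t.length + 3 : Nat) : Int) - 3)))
      (some ((t.length + 3 : Nat) : Int)) = [a, b, c] := by
    rw [hsub, max_eq_right (by positivity)]
    rw [PySem.List.slice_natCast]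
    rw [List.drop_append_of_le_length (le_refl _)]
    simp
  rw [hchunk]
  have hmap : (PySem.List.pyRange (t.length : Int) 0 (-3)).map
        (fun i => PySem.List.slice (t ++ [a, b, c]) (some (max 0 (i - 3))) (some i))
      = (PySem.List.pyRange (t.length : Int) 0 (-3)).map
        (fun i => PySem.List.slice t (some (max 0 (i - 3))) (some i)) := by
    apply List.map_congr_left
    intro i hi
    obtain ⟨hi0, him⟩ := mem_pyRange_neg3 hi
    rw [PySem.List.slice_toNat _ (by positivity) (by omega),
        PySem.List.slice_toNat _ (by positivity) (by omega)]
    have hml : (max 0 (i - 3)).toNat ≤ t.length := by omega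
    rw [List.drop_append_of_le_length hml]
    rw [List.take_append_of_le_length (by simp; omega)]
  rw [hmap]
  have hne : ((PySem.List.pyRange (t.length : Int) 0 (-3)).map
      (fun i => PySem.List.slice t (some (max 0 (i - 3))) (some i))).reverse ≠ [] := by
    rw [pyRange_neg3_cons _ (by push_cast; omega)]
    simp
  rw [join_append_singleton _ _ _ hne]
  simp [List.append_assoc]

-- main equivalence, by induction peeling three characters at a time
theorem spaceAB_aux : ∀ (k : Nat) (s : List Char), s.length ≤ k → spaceA s = spaceB s := by
  intro k
  induction k with
  | zero =>
      intro s h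
      rw [spaceA_short s (by omega), spaceB_short s (by omega)]
  | succ k ih =>
      intro s h
      by_cases h3 : s.length ≤ 3
      · rw [spaceA_short s h3, spaceB_short s h3]
      · rcases hrev : s.reverse with _ | ⟨c, _ | ⟨b, _ | ⟨a, r⟩⟩⟩
        · exfalso; apply h3
          have hl := congrArg List.length hrev
          simp only [List.length_reverse, List.length_cons, List.length_nil] at hl
          omega
        · exfalso; apply h3
          have hl := congrArg List.length hrev
          simp only [List.length_reverse, List.length_cons, List.length_nil] at hl
          omega
        · exfalso; apply h3
          have hl := congrArg List.length hrev
          simp only [List.length_reverse, List.length_cons, List.length_nil] at hl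
          omega
        · have hs : s = r.reverse ++ [a, b, c] := by
            have h2 := congrArg List.reverse hrev
            simpa using h2
          have hrlen : s.length = r.length + 3 := by
            have h2 := congrArg List.length hrev
            simpa using h2
          have hrne : r.reverse ≠ [] := by
            simp only [ne_eq, List.reverse_eq_nil_iff]
            intro hc
            rw [hc] at hrlen
            simp at hrlen
            omega
          have hrk : r.length ≤ k := by omega
          rw [hs, spaceA_step _ _ _ _ hrne, spaceB_step _ _ _ _ hrne,
            ih r.reverse (by rw [List.length_reverse]; exact hrk)]

theorem spaceA_eq_spaceB (s : List Char) : spaceA s = spaceB s :=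
  spaceAB_aux s.length s le_rfl

-- ===== VERDICT (by name: the statement is the Claim_ definition above) =====
theorem space_in_numbers_spec : Claim_equal_space_in_numbers := by
  intro x _
  unfold Spec_space_in_numbers space_in_numbers space_in_numbers_alt
  rw [spaceA_eq_spaceB]
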